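-- pv_equiv track=rewrite | github.com/akent4000/Universal-Gate-Compiler | nand_optimizer/synthesis/sat_resub.py | _functional_dependency
-- ===== SOURCE A (Python) =====
-- from typing    import Dict, List, Optional, Set, Tuple
--
-- def _functional_dependency(
--     target_tt:    int,
--     divisor_tts:  List[int],
--     V:            int,
-- ) -> Optional[int]:
--     """
--     Does ``target_tt`` factor through the divisors, i.e. is there a unique
--     function F such that ``target_tt[m] == F(div_1[m], ..., div_m[m])``
--     for every minterm m of the V-size cut space?
--
--     Returns F's truth table (as a 2^m-bit int over the divisors as
--     variables) or ``None`` if no such F exists (some divisor-tuple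
--     maps to both 0 and 1 in the target).
--     """
--     m = len(divisor_tts)
--     tuple_to_val: Dict[int, int] = {}
--     F_tt = 0
--
--     for p in range(V):
--         div_tup = 0
--         for j, dt in enumerate(divisor_tts):
--             div_tup |= ((dt >> p) & 1) << j
--         t_val = (target_tt >> p) & 1
--         if div_tup in tuple_to_val:
--             if tuple_to_val[div_tup] != t_val:
--                 return None
--         else:
--             tuple_to_val[div_tup] = t_val
--             if t_val:
--                 F_tt |= 1 << div_tup
--
--     return F_tt
-- ===== SOURCE B (Python) =====
-- from typing import Dict, List, Optional, Set, Tuple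
--
-- def _functional_dependency(
--     target_tt:    int,
--     divisor_tts:  List[int],
--     V:            int,
-- ) -> Optional[int]:
--     # Staged, check-free scan.  For every position p at or beyond the bit
--     # length of all operands each shifted bit is just the operand's sign bit,
--     # so all those positions yield one and the same (tuple, value) pair: one
--     # representative position suffices and the scan is capped at min(V, bl+1).
--     # The capped pass only collects the divisor tuples seen with target bit 1
--     # and with target bit 0 into two sets -- no lookup, no comparison, no
--     # early return; consistency is decided afterwards by one set intersection,
--     # and F's truth table is then built from the 1-set alone.
--     bl = target_tt.bit_length()
--     for dt in divisor_tts: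
--         b = dt.bit_length()
--         if b > bl:
--             bl = b
--     n = V if V <= bl else bl + 1
--     one_tups = set()
--     zero_tups = set()
--     for p in range(n):
--         div_tup = 0
--         for j, dt in enumerate(divisor_tts):
--             div_tup |= ((dt >> p) & 1) << j
--         if (target_tt >> p) & 1:
--             one_tups.add(div_tup)
--         else:
--             zero_tups.add(div_tup)
--     if one_tups & zero_tups:
--         return None
--     F_tt = 0
--     for div_tup in one_tups:
--         F_tt |= 1 << div_tup
--     return F_tt
-- ===== Notes on version B (the rewrite author's own statement) =====
-- stated objective: alternative
-- what changed: A builds a dict of first-seen tuple values and checks consistency inside the loop with an early return over all V positions; B has no lookup, comparison or early return in the loop: it caps the scan at the operands' bit length plus one representative position (beyond it every shifted bit is just the sign bit), collects the divisor tuples seen with target bit 1 and 0 into two sets, decides consistency once at the end by a set intersection, and then builds F from the 1-set alone.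
import Mathlib
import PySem

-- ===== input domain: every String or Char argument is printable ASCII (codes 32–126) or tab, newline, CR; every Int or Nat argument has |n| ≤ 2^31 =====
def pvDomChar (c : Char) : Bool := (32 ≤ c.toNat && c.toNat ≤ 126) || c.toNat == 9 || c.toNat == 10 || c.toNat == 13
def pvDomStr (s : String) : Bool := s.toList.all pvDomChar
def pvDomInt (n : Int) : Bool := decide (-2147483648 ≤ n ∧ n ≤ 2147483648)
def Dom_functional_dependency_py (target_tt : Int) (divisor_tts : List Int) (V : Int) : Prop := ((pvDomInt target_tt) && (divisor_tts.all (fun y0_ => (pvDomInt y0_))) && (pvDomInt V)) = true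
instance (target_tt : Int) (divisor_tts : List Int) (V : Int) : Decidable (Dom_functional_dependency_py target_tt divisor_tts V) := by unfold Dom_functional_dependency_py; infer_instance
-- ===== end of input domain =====

-- B replaces A's dict-and-early-return consistency check by a check-free collecting pass
-- (two sets: tuples seen with target bit 1 / with bit 0) capped at the operands' bit length
-- (beyond it every shifted bit is the sign bit, so one representative position suffices),
-- one final set intersection for consistency, and a separate build of F from the 1-set;
-- objective: alternative (different staging; the capped scan does min(V, bitlen)+1 rounds).


-- ===== PORT A =====
-- inner loop shared by both Pythons verbatim:
--   div_tup = 0; for j, dt in enumerate(divisor_tts): div_tup |= ((dt >> p) & 1) << j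
-- p comes from range(V) (resp. range(n)), hence 0 ≤ p and the shift amount p.toNat is exact.
def pyDivTup (divisor_tts : List Int) (p : Int) : Int :=
  (divisor_tts.foldl
    (fun (s : Nat × Int) (dt : Int) =>
      (s.1 + 1, PySem.Int.bor s.2 ((PySem.Int.band (dt >>> p.toNat) 1) <<< s.1)))
    (0, 0)).2

-- the `for p in range(V)` loop of A, with the dict and the early `return None`
def fdLoopA (target_tt : Int) (divisor_tts : List Int) :
    List Int → PySem.Dict Int Int → Int → Option Int
  | [], _, F_tt => some F_tt
  | p :: ps, tuple_to_val, F_tt =>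
    let div_tup := pyDivTup divisor_tts p
    let t_val := PySem.Int.band (target_tt >>> p.toNat) 1
    match tuple_to_val.get? div_tup with
    | some w =>
        if w ≠ t_val then none
        else fdLoopA target_tt divisor_tts ps tuple_to_val F_tt
    | none =>
        fdLoopA target_tt divisor_tts ps (tuple_to_val.insert div_tup t_val)
          -- `1 << div_tup`: div_tup ≥ 0, so the shift amount div_tup.toNat is exact
          (if t_val ≠ 0 then PySem.Int.bor F_tt ((1 : Int) <<< div_tup.toNat) else F_tt)

def functional_dependency_py (target_tt : Int) (divisor_tts : List Int) (V : Int) : Option Int :=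
  fdLoopA target_tt divisor_tts (PySem.List.pyRange 0 V 1) PySem.Dict.empty 0

-- ===== PORT B =====
-- B's `bl = target_tt.bit_length(); for dt in divisor_tts: b = dt.bit_length(); if b > bl: bl = b`
def fdBitLen (target_tt : Int) (divisor_tts : List Int) : Nat :=
  divisor_tts.foldl
    (fun bl dt => if PySem.Int.bitLength dt > bl then PySem.Int.bitLength dt else bl)
    (PySem.Int.bitLength target_tt)

-- B's `for p in range(n)` collecting loop over the pair (one_tups, zero_tups):
-- no lookup, no comparison, no early return — just a set add per position
def fdCollect (target_tt : Int) (divisor_tts : List Int) :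
    List Int → PySem.Set Int × PySem.Set Int → PySem.Set Int × PySem.Set Int
  | [], s => s
  | p :: ps, s =>
    let div_tup := pyDivTup divisor_tts p
    if PySem.Int.band (target_tt >>> p.toNat) 1 ≠ 0 then
      fdCollect target_tt divisor_tts ps (PySem.Set.add s.1 div_tup, s.2)
    else
      fdCollect target_tt divisor_tts ps (s.1, PySem.Set.add s.2 div_tup)

-- B's `F_tt = 0; for div_tup in one_tups: F_tt |= 1 << div_tup` (Python iterates the set
-- in unspecified order; the OR'd value is order-independent, so folding the Set's list
-- in insertion order computes the same int; div_tup ≥ 0, so .toNat is exact)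
def fdBuildF (one_tups : PySem.Set Int) : Int :=
  one_tups.foldl (fun (F_tt : Int) (div_tup : Int) =>
    let sh : Nat := div_tup.toNat
    PySem.Int.bor F_tt ((1 : Int) <<< sh)) (0 : Int)

-- `n = V if V <= bl else bl + 1`, the collecting pass, `if one_tups & zero_tups: return None`,
-- then the F build
def functional_dependency_py_alt (target_tt : Int) (divisor_tts : List Int) (V : Int) : Option Int :=
  let bl : Int := (fdBitLen target_tt divisor_tts : Int)
  let n : Int := if V ≤ bl then V else bl + 1
  let s := fdCollect target_tt divisor_tts (PySem.List.pyRange 0 n 1)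
    (PySem.Set.empty, PySem.Set.empty)
  if PySem.Set.inter s.1 s.2 ≠ [] then none else some (fdBuildF s.1)

-- ===== PRECONDITION & SPEC =====
def Spec_functional_dependency_py (target_tt : Int) (divisor_tts : List Int) (V : Int) (out : Option Int) : Prop := out = functional_dependency_py_alt target_tt divisor_tts V
instance (target_tt : Int) (divisor_tts : List Int) (V : Int) (out : Option Int) : Decidable (Spec_functional_dependency_py target_tt divisor_tts V out) := by unfold Spec_functional_dependency_py; infer_instance

-- ===== CLAIM (what is proved, stated in full; the proofs are below) =====
def Claim_equal_functional_dependency_py : Prop := ∀ (target_tt : Int) (divisor_tts : List Int) (V : Int), Dom_functional_dependency_py target_tt divisor_tts V → Spec_functional_dependency_py target_tt divisor_tts V (functional_dependency_py target_tt divisor_tts V)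

-- ===== LEMMAS AND PROOFS =====

lemma tval_zero_or_one (x : Int) : PySem.Int.band x 1 = 0 ∨ PySem.Int.band x 1 = 1 := by
  rw [PySem.Int.band_one]
  have h1 := PySem.Int.mod_nonneg x (b := 2) (by norm_num)
  have h2 := PySem.Int.mod_lt x (b := 2) (by norm_num)
  omega

-- appending a fresh tuple to the 1-set ORs its bit into the built table
lemma buildF_append (os : List Int) (k : Int) :
    fdBuildF (os ++ [k]) = PySem.Int.bor (fdBuildF os) ((1 : Int) <<< k.toNat) := by
  unfold fdBuildF
  rw [List.foldl_append]
  rfl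

-- membership only accumulates in fdCollect
lemma fdCollect_mono (t : Int) (dts : List Int) (ps : List Int) (os zs : PySem.Set Int)
    (k : Int) :
    (k ∈ os → k ∈ (fdCollect t dts ps (os, zs)).1) ∧
    (k ∈ zs → k ∈ (fdCollect t dts ps (os, zs)).2) := by
  induction ps generalizing os zs with
  | nil => simp [fdCollect]
  | cons p ps ih =>
    by_cases htv : PySem.Int.band (t >>> p.toNat) 1 ≠ 0
    · have hstep : fdCollect t dts (p :: ps) (os, zs) =
          fdCollect t dts ps (PySem.Set.add os (pyDivTup dts p), zs) := by
        simp [fdCollect, htv]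
      rw [hstep]
      exact ⟨fun h => (ih _ _).1 ((PySem.Set.mem_add _ _ _).2 (Or.inl h)),
             fun h => (ih _ _).2 h⟩
    · have hstep : fdCollect t dts (p :: ps) (os, zs) =
          fdCollect t dts ps (os, PySem.Set.add zs (pyDivTup dts p)) := by
        simp [fdCollect, htv]
      rw [hstep]
      exact ⟨fun h => (ih _ _).1 h,
             fun h => (ih _ _).2 ((PySem.Set.mem_add _ _ _).2 (Or.inl h))⟩

lemma inter_ne_nil_of_mem {os zs : PySem.Set Int} {k : Int} (h1 : k ∈ os) (h2 : k ∈ zs) :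
    PySem.Set.inter os zs ≠ [] :=
  List.ne_nil_of_mem ((PySem.Set.mem_inter _ _ _).2 ⟨h1, h2⟩)

lemma inter_eq_nil_of_disjoint {os zs : PySem.Set Int}
    (h : ∀ k, ¬ (k ∈ os ∧ k ∈ zs)) : PySem.Set.inter os zs = [] := by
  by_contra hne
  obtain ⟨k, hk⟩ := List.exists_mem_of_ne_nil _ hne
  exact h k ((PySem.Set.mem_inter _ _ _).1 hk)

-- main invariant: A's dict (and F_tt) are exactly described by the pair of sets (os, zs)
lemma loop_eq (t : Int) (dts : List Int) (ps : List Int) (d : PySem.Dict Int Int)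
    (os zs : PySem.Set Int)
    (hdis : ∀ k, ¬ (k ∈ os ∧ k ∈ zs))
    (hd : ∀ k : Int, d.get? k =
      if k ∈ os then some 1 else if k ∈ zs then some 0 else none) :
    fdLoopA t dts ps d (fdBuildF os) =
      (let s := fdCollect t dts ps (os, zs)
       if PySem.Set.inter s.1 s.2 ≠ [] then none else some (fdBuildF s.1)) := by
  induction ps generalizing d os zs with
  | nil =>
    simp [fdLoopA, fdCollect, inter_eq_nil_of_disjoint hdis]
  | cons p ps ih =>
    set k : Int := pyDivTup dts p with hkdef
    have htv := tval_zero_or_one (t >>> p.toNat)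
    by_cases hko : k ∈ os
    · rcases htv with htv | htv
      · -- recorded as 1, now sees 0: A returns none; k ends up in both sets
        have hA : fdLoopA t dts (p :: ps) d (fdBuildF os) = none := by
          simp [fdLoopA, ← hkdef, hd k, hko, htv]
        have hstep : fdCollect t dts (p :: ps) (os, zs) =
            fdCollect t dts ps (os, PySem.Set.add zs k) := by
          simp [fdCollect, ← hkdef, htv]
        have h1 := (fdCollect_mono t dts ps os (PySem.Set.add zs k) k).1 hko
        have h2 := (fdCollect_mono t dts ps os (PySem.Set.add zs k) k).2
          ((PySem.Set.mem_add _ _ _).2 (Or.inr rfl))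
        rw [hA, hstep]
        simp [inter_ne_nil_of_mem h1 h2]
      · -- recorded as 1, sees 1: A recurses unchanged; the set add is a no-op
        have hA : fdLoopA t dts (p :: ps) d (fdBuildF os) = fdLoopA t dts ps d (fdBuildF os) := by
          simp [fdLoopA, ← hkdef, hd k, hko, htv]
        have hstep : fdCollect t dts (p :: ps) (os, zs) = fdCollect t dts ps (os, zs) := by
          simp [fdCollect, ← hkdef, htv, PySem.Set.add_of_mem hko]
        rw [hA, hstep]; exact ih d os zs hdis hd
    · by_cases hkz : k ∈ zs
      · rcases htv with htv | htv
        · -- recorded as 0, sees 0: A recurses unchanged; the set add is a no-op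
          have hA : fdLoopA t dts (p :: ps) d (fdBuildF os) = fdLoopA t dts ps d (fdBuildF os) := by
            simp [fdLoopA, ← hkdef, hd k, hko, hkz, htv]
          have hstep : fdCollect t dts (p :: ps) (os, zs) = fdCollect t dts ps (os, zs) := by
            simp [fdCollect, ← hkdef, htv, PySem.Set.add_of_mem hkz]
          rw [hA, hstep]; exact ih d os zs hdis hd
        · -- recorded as 0, sees 1: A returns none; k ends up in both sets
          have hA : fdLoopA t dts (p :: ps) d (fdBuildF os) = none := by
            simp [fdLoopA, ← hkdef, hd k, hko, hkz, htv]
          have hstep : fdCollect t dts (p :: ps) (os, zs) =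
              fdCollect t dts ps (PySem.Set.add os k, zs) := by
            simp [fdCollect, ← hkdef, htv]
          have h1 := (fdCollect_mono t dts ps (PySem.Set.add os k) zs k).1
            ((PySem.Set.mem_add _ _ _).2 (Or.inr rfl))
          have h2 := (fdCollect_mono t dts ps (PySem.Set.add os k) zs k).2 hkz
          rw [hA, hstep]
          simp [inter_ne_nil_of_mem h1 h2]
      · -- fresh tuple
        rcases htv with htv | htv
        · -- t_val = 0: A stores 0, keeps F; B adds k to the 0-set
          have hA : fdLoopA t dts (p :: ps) d (fdBuildF os) =
              fdLoopA t dts ps (d.insert k 0) (fdBuildF os) := by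
            simp [fdLoopA, ← hkdef, hd k, hko, hkz, htv]
          have hstep : fdCollect t dts (p :: ps) (os, zs) =
              fdCollect t dts ps (os, PySem.Set.add zs k) := by
            simp [fdCollect, ← hkdef, htv]
          rw [hA, hstep]
          apply ih
          · intro k' hk'
            obtain ⟨h1, h2⟩ := hk'
            rcases (PySem.Set.mem_add _ _ _).1 h2 with h | h
            · exact hdis k' ⟨h1, h⟩
            · exact hko (h ▸ h1)
          · intro k'
            rw [PySem.Dict.get?_insert]
            by_cases hk' : k' = k
            · subst hk'
              rw [if_pos rfl, if_neg hko, if_pos ((PySem.Set.mem_add _ _ _).2 (Or.inr rfl))]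
            · rw [if_neg hk', hd k']
              by_cases hm : k' ∈ zs
              · simp [hm, PySem.Set.mem_add]
              · have : k' ∉ PySem.Set.add zs k :=
                  fun h => ((PySem.Set.mem_add _ _ _).1 h).elim hm hk'
                simp [hm, this]
        · -- t_val = 1: A stores 1 and ORs F; B adds k to the 1-set
          have hA : fdLoopA t dts (p :: ps) d (fdBuildF os) =
              fdLoopA t dts ps (d.insert k 1) (fdBuildF (PySem.Set.add os k)) := by
            rw [PySem.Set.add_of_not_mem hko, buildF_append]
            simp [fdLoopA, ← hkdef, hd k, hko, hkz, htv]
          have hstep : fdCollect t dts (p :: ps) (os, zs) =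
              fdCollect t dts ps (PySem.Set.add os k, zs) := by
            simp [fdCollect, ← hkdef, htv]
          rw [hA, hstep]
          apply ih
          · intro k' hk'
            obtain ⟨h1, h2⟩ := hk'
            rcases (PySem.Set.mem_add _ _ _).1 h1 with h | h
            · exact hdis k' ⟨h, h2⟩
            · exact hkz (h ▸ h2)
          · intro k'
            rw [PySem.Dict.get?_insert]
            by_cases hk' : k' = k
            · subst hk'
              rw [if_pos rfl, if_pos ((PySem.Set.mem_add _ _ _).2 (Or.inr rfl))]
            · rw [if_neg hk', hd k']
              by_cases hm : k' ∈ os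
              · simp [hm, PySem.Set.mem_add]
              · have : k' ∉ PySem.Set.add os k :=
                  fun h => ((PySem.Set.mem_add _ _ _).1 h).elim hm hk'
                simp [hm, this]

-- ===== the bit-length cap: positions p ≥ fdBitLen all act like position fdBitLen =====

lemma shiftRight_stable (x : Int) (p : Nat) (h : PySem.Int.bitLength x ≤ p) :
    x >>> p = if x < 0 then -1 else 0 := by
  have hlt := PySem.Int.lt_two_pow_bitLength x
  have h2 : x.natAbs < 2 ^ p := lt_of_lt_of_le hlt (Nat.pow_le_pow_right (by norm_num) h)
  cases x with
  | ofNat m =>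
      have hm : m >>> p = 0 := by
        rw [Nat.shiftRight_eq_div_pow]; exact Nat.div_eq_of_lt (by simpa using h2)
      have he : (Int.ofNat m) >>> p = Int.ofNat (m >>> p) := rfl
      rw [he, hm]; simp
  | negSucc m =>
      have hm : m >>> p = 0 := by
        rw [Nat.shiftRight_eq_div_pow]
        exact Nat.div_eq_of_lt (by simp [Int.natAbs_negSucc] at h2; omega)
      have he : (Int.negSucc m) >>> p = Int.negSucc (m >>> p) := rfl
      rw [he, hm]
      simp [Int.negSucc_lt_zero]

lemma tval_stable (t : Int) (p : Nat) (h : PySem.Int.bitLength t ≤ p) :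
    PySem.Int.band (t >>> p) 1 = if t < 0 then 1 else 0 := by
  rw [shiftRight_stable t p h]
  split_ifs <;> decide

lemma fdBitLen_init_le (dts : List Int) (b : Nat) :
    b ≤ dts.foldl
      (fun bl dt => if PySem.Int.bitLength dt > bl then PySem.Int.bitLength dt else bl) b := by
  induction dts generalizing b with
  | nil => exact le_rfl
  | cons dt dts ih =>
    refine le_trans ?_ (ih _)
    dsimp only
    split_ifs with h
    · omega
    · exact le_rfl

lemma fdBitLen_mem_le (dts : List Int) (b : Nat) (dt : Int) (hm : dt ∈ dts) :
    PySem.Int.bitLength dt ≤ dts.foldl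
      (fun bl dt => if PySem.Int.bitLength dt > bl then PySem.Int.bitLength dt else bl) b := by
  induction dts generalizing b with
  | nil => cases hm
  | cons d dts ih =>
    rcases List.mem_cons.1 hm with rfl | hm
    · refine le_trans ?_ (fdBitLen_init_le dts _)
      dsimp only
      split_ifs with h <;> omega
    · exact ih _ hm

lemma target_le_fdBitLen (t : Int) (dts : List Int) :
    PySem.Int.bitLength t ≤ fdBitLen t dts := fdBitLen_init_le dts _

lemma div_le_fdBitLen (t : Int) (dts : List Int) (dt : Int) (hm : dt ∈ dts) :
    PySem.Int.bitLength dt ≤ fdBitLen t dts := fdBitLen_mem_le dts _ dt hm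

lemma pyDivTup_congr (dts : List Int) (p q : Int)
    (h : ∀ dt ∈ dts, dt >>> p.toNat = dt >>> q.toNat) :
    pyDivTup dts p = pyDivTup dts q := by
  unfold pyDivTup
  suffices hgen : ∀ (s : Nat × Int),
      dts.foldl (fun (s : Nat × Int) (dt : Int) =>
        (s.1 + 1, PySem.Int.bor s.2 ((PySem.Int.band (dt >>> p.toNat) 1) <<< s.1))) s =
      dts.foldl (fun (s : Nat × Int) (dt : Int) =>
        (s.1 + 1, PySem.Int.bor s.2 ((PySem.Int.band (dt >>> q.toNat) 1) <<< s.1))) s by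
    rw [hgen]
  induction dts with
  | nil => intro s; rfl
  | cons dt dts ih =>
    intro s
    simp only [List.foldl_cons]
    rw [h dt (List.mem_cons_self)]
    exact ih (fun d hd => h d (List.mem_cons_of_mem _ hd)) _

lemma fdCollect_append (t : Int) (dts : List Int) (l1 l2 : List Int)
    (s : PySem.Set Int × PySem.Set Int) :
    fdCollect t dts (l1 ++ l2) s = fdCollect t dts l2 (fdCollect t dts l1 s) := by
  induction l1 generalizing s with
  | nil => rfl
  | cons p l1 ih =>
    by_cases htv : PySem.Int.band (t >>> p.toNat) 1 ≠ 0 <;>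
      simp [fdCollect, htv, ih]

-- beyond-bit-length tail: every step repeats the representative step, hence is a no-op
lemma tail_noop (t : Int) (dts : List Int) (bl : Int) (l : List Int)
    (s : PySem.Set Int × PySem.Set Int)
    (hst : ∀ p ∈ l, pyDivTup dts p = pyDivTup dts bl ∧
      PySem.Int.band (t >>> p.toNat) 1 = PySem.Int.band (t >>> bl.toNat) 1)
    (h1 : PySem.Int.band (t >>> bl.toNat) 1 ≠ 0 → pyDivTup dts bl ∈ s.1)
    (h2 : PySem.Int.band (t >>> bl.toNat) 1 = 0 → pyDivTup dts bl ∈ s.2) :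
    fdCollect t dts l s = s := by
  induction l with
  | nil => rfl
  | cons p l ih =>
    obtain ⟨hk, htv⟩ := hst p (List.mem_cons_self)
    by_cases hc : PySem.Int.band (t >>> bl.toNat) 1 ≠ 0
    · have : fdCollect t dts (p :: l) s =
          fdCollect t dts l (PySem.Set.add s.1 (pyDivTup dts bl), s.2) := by
        simp [fdCollect, htv, hk, hc]
      rw [this, PySem.Set.add_of_mem (h1 hc)]
      exact ih (fun q hq => hst q (List.mem_cons_of_mem _ hq))
    · have hc0 : PySem.Int.band (t >>> bl.toNat) 1 = 0 := by tauto
      have : fdCollect t dts (p :: l) s =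
          fdCollect t dts l (s.1, PySem.Set.add s.2 (pyDivTup dts bl)) := by
        simp [fdCollect, htv, hk, hc0]
      rw [this, PySem.Set.add_of_mem (h2 hc0)]
      exact ih (fun q hq => hst q (List.mem_cons_of_mem _ hq))

-- the scan over range(V) equals the scan capped at n = min(V, fdBitLen + 1)
lemma collect_cap (t : Int) (dts : List Int) (V : Int) :
    fdCollect t dts (PySem.List.pyRange 0 V 1) (PySem.Set.empty, PySem.Set.empty) =
      fdCollect t dts
        (PySem.List.pyRange 0
          (if V ≤ ((fdBitLen t dts : Nat) : Int) then V else ((fdBitLen t dts : Nat) : Int) + 1) 1)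
        (PySem.Set.empty, PySem.Set.empty) := by
  set blN : Nat := fdBitLen t dts with hbl
  by_cases hV : V ≤ ((blN : Nat) : Int)
  · rw [if_pos hV]
  · rw [if_neg hV]
    have hVlt : ((blN : Nat) : Int) + 1 ≤ V := by omega
    -- every p with bl ≤ p acts exactly like position bl
    have hstable : ∀ p : Int, ((blN : Nat) : Int) ≤ p →
        pyDivTup dts p = pyDivTup dts ((blN : Nat) : Int) ∧
        PySem.Int.band (t >>> p.toNat) 1 =
          PySem.Int.band (t >>> (((blN : Nat) : Int)).toNat) 1 := by
      intro p hp
      have hpN : blN ≤ p.toNat := by omega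
      constructor
      · apply pyDivTup_congr
        intro dt hdt
        have hb := div_le_fdBitLen t dts dt hdt
        rw [shiftRight_stable dt p.toNat (by omega),
            shiftRight_stable dt (((blN : Nat) : Int)).toNat (by omega)]
      · have hb := target_le_fdBitLen t dts
        rw [tval_stable t p.toNat (by omega), tval_stable t (((blN : Nat) : Int)).toNat (by omega)]
    rw [PySem.List.pyRange_one_append 0 (((blN : Nat) : Int) + 1) V (by omega) hVlt,
        fdCollect_append]
    -- the prefix ends with the representative step at position bl, which inserts the tuple
    set s1 := fdCollect t dts (PySem.List.pyRange 0 (((blN : Nat) : Int) + 1) 1)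
      (PySem.Set.empty, PySem.Set.empty) with hs1
    have hsplit : PySem.List.pyRange 0 (((blN : Nat) : Int) + 1) 1 =
        PySem.List.pyRange 0 ((blN : Nat) : Int) 1 ++ [((blN : Nat) : Int)] :=
      PySem.List.pyRange_one_succ_right (by omega)
    set s0 := fdCollect t dts (PySem.List.pyRange 0 ((blN : Nat) : Int) 1)
      (PySem.Set.empty, PySem.Set.empty) with hs0
    have hlast : s1 = fdCollect t dts [((blN : Nat) : Int)] s0 := by
      rw [hs1, hsplit, fdCollect_append]
    apply tail_noop t dts ((blN : Nat) : Int)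
    · intro p hp
      have := (PySem.List.mem_pyRange_one).1 hp
      exact hstable p (by omega)
    · intro hc
      have hc' : PySem.Int.band (t >>> blN) 1 ≠ 0 := by simpa using hc
      rw [hlast]
      have : fdCollect t dts [((blN : Nat) : Int)] s0 =
          (PySem.Set.add s0.1 (pyDivTup dts ((blN : Nat) : Int)), s0.2) := by
        simp [fdCollect, hc']
      rw [this]
      exact (PySem.Set.mem_add _ _ _).2 (Or.inr rfl)
    · intro hc
      have hc' : PySem.Int.band (t >>> blN) 1 = 0 := by simpa using hc
      rw [hlast]
      have : fdCollect t dts [((blN : Nat) : Int)] s0 =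
          (s0.1, PySem.Set.add s0.2 (pyDivTup dts ((blN : Nat) : Int))) := by
        simp [fdCollect, hc']
      rw [this]
      exact (PySem.Set.mem_add _ _ _).2 (Or.inr rfl)

-- ===== VERDICT (by name: the statement is the Claim_ definition above) =====
theorem functional_dependency_py_spec : Claim_equal_functional_dependency_py := by
  intro target_tt divisor_tts V _
  unfold Spec_functional_dependency_py functional_dependency_py functional_dependency_py_alt
  dsimp only
  have h := loop_eq target_tt divisor_tts (PySem.List.pyRange 0 V 1) PySem.Dict.empty
    PySem.Set.empty PySem.Set.empty
    (by simp [PySem.Set.empty]) (by intro k; simp [PySem.Dict.get?_empty, PySem.Set.empty])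
  have h0 : fdBuildF PySem.Set.empty = 0 := rfl
  rw [h0] at h
  rw [h, collect_cap]
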